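-- pv_equiv track=rewrite | github.com/shruum/change_detection | options.py | find_dataset_name
-- ===== SOURCE A (Python) =====
-- def find_dataset_name(str1, str2):
--     """kind of finding the largest common substring"""
--     dataset_name = ""
--     word = ""
--     for c1, c2 in zip(str1, str2):
--         if c1 != c2:
--             break
--         if c1 == "/":
--             dataset_name = dataset_name + word + "_"
--             word = ""
--         else:
--             word = word + c1
--     return dataset_name
-- ===== SOURCE B (Python) =====
-- def find_dataset_name(str1, str2):
--     """kind of finding the largest common substring"""
--     n = min(len(str1), len(str2))
--     i = 0
--     while i < n and str1[i] == str2[i]: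
--         i += 1
--     return ''.join(p + '_' for p in str1[:i].split('/')[:-1])
-- ===== Notes on version B (the rewrite author's own statement) =====
-- stated objective: idiomatic
-- what changed: Replaced A's stateful character loop (accumulating word/dataset_name with a break) by a two-phase pass: find the first mismatch index, then split the common prefix on '/' and join every segment but the last with a trailing underscore.
import Mathlib
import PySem

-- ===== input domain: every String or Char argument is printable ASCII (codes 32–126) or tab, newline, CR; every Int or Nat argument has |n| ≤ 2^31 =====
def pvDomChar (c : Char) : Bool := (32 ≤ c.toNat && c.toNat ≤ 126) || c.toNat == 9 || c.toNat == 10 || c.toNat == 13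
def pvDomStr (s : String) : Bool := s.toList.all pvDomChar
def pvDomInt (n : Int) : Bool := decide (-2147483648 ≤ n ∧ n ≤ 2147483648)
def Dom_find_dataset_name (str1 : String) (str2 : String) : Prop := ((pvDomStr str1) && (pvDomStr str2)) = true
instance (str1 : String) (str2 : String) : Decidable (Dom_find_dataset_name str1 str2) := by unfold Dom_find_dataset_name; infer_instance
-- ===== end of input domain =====

-- B replaces A's stateful character loop (accumulating `word`/`dataset_name`) by a two-phase
-- pass: find the first mismatch index, then split the common prefix on '/' and rejoin all but
-- the last segment with trailing underscores (objective: idiomatic; same O(n) cost).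

-- ===== PORT A =====
-- the for-loop over zip(str1, str2) with its two string accumulators, with break on mismatch
def pvLoopA : List (Char × Char) → String → String → String
  | [], dataset_name, _word => dataset_name
  | (c1, c2) :: rest, dataset_name, word =>
    if c1 ≠ c2 then dataset_name                      -- break
    else if c1 = '/' then pvLoopA rest (dataset_name ++ word ++ "_") ""
    else pvLoopA rest dataset_name (word ++ c1.toString)

def find_dataset_name (str1 : String) (str2 : String) : String :=
  pvLoopA (str1.toList.zip str2.toList) "" ""

-- ===== PORT B =====
-- the while-loop `while i < n and str1[i] == str2[i]: i += 1` (n = min of the lengths)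
def pvMismatch (s1 s2 : List Char) (n : Nat) (i : Nat) : Nat :=
  if i < n ∧ s1.getD i default == s2.getD i default then pvMismatch s1 s2 n (i + 1) else i
  termination_by n - i
  decreasing_by omega

-- str1[:i].split('/')[:-1], each segment + '_', joined.  `List.splitOn '/'` is exact for
-- Python str.split('/') (single-char separator, empties kept).
def find_dataset_name_alt (str1 : String) (str2 : String) : String :=
  let s1 := str1.toList
  let s2 := str2.toList
  let i := pvMismatch s1 s2 (min s1.length s2.length) 0
  String.ofList (((((s1.take i).splitOn '/').dropLast).map (fun p => p ++ ['_'])).flatten)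

-- ===== PRECONDITION & SPEC =====
def Spec_find_dataset_name (str1 : String) (str2 : String) (out : String) : Prop := out = find_dataset_name_alt str1 str2
instance (str1 : String) (str2 : String) (out : String) : Decidable (Spec_find_dataset_name str1 str2 out) := by unfold Spec_find_dataset_name; infer_instance

-- ===== CLAIM (what is proved, stated in full; the proofs are below) =====
def Claim_equal_find_dataset_name : Prop := ∀ (str1 : String) (str2 : String), Dom_find_dataset_name str1 str2 → Spec_find_dataset_name str1 str2 (find_dataset_name str1 str2)

-- ===== LEMMAS AND PROOFS =====

-- proof-side recursive description of the common prefix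
def pvCpfx : List Char → List Char → List Char
  | a :: as, b :: bs => if a = b then a :: pvCpfx as bs else []
  | _, _ => []

theorem pvCpfx_nil_right : ∀ (l : List Char), pvCpfx l [] = [] := by
  intro l; cases l <;> rfl

theorem pvCpfx_prefix : ∀ (s1 s2 : List Char), pvCpfx s1 s2 <+: s1 := by
  intro s1
  induction s1 with
  | nil => intro s2; cases s2 <;> simp [pvCpfx]
  | cons a as ih =>
    intro s2
    cases s2 with
    | nil => simp [pvCpfx]
    | cons b bs =>
      by_cases h : a = b <;> simp [pvCpfx, h, ih]

-- the while-loop computes i + |common prefix of the drops|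
theorem pvMismatch_eq (s1 s2 : List Char) :
    ∀ i, pvMismatch s1 s2 (min s1.length s2.length) i
      = i + (pvCpfx (s1.drop i) (s2.drop i)).length := by
  intro i
  rw [pvMismatch]
  by_cases hlt : i < min s1.length s2.length
  · have h1 : i < s1.length := lt_of_lt_of_le hlt (Nat.min_le_left _ _)
    have h2 : i < s2.length := lt_of_lt_of_le hlt (Nat.min_le_right _ _)
    have hd1 : s1.drop i = s1[i] :: s1.drop (i + 1) := List.drop_eq_getElem_cons h1
    have hd2 : s2.drop i = s2[i] :: s2.drop (i + 1) := List.drop_eq_getElem_cons h2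
    have hg1 : s1.getD i default = s1[i] := by
      rw [List.getD, List.getElem?_eq_getElem h1]; rfl
    have hg2 : s2.getD i default = s2[i] := by
      rw [List.getD, List.getElem?_eq_getElem h2]; rfl
    by_cases heq : s1[i] = s2[i]
    · rw [if_pos ⟨hlt, by rw [hg1, hg2]; exact beq_iff_eq.mpr heq⟩, pvMismatch_eq s1 s2 (i + 1),
        hd1, hd2]
      simp [pvCpfx, heq]
      omega
    · rw [if_neg (by rw [hg1, hg2]; intro h; exact heq (beq_iff_eq.mp h.2)), hd1, hd2]
      simp [pvCpfx, heq]
  · rw [if_neg (by intro h; exact hlt h.1)]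
    have : s1.drop i = [] ∨ s2.drop i = [] := by
      rcases Nat.lt_or_ge i s1.length with h1 | h1
      · right
        have : s2.length ≤ i := by omega
        simp [List.drop_eq_nil_iff, this]
      · left; simp [List.drop_eq_nil_iff, h1]
    rcases this with h | h <;> rw [h]
    · simp [pvCpfx]
    · rw [pvCpfx_nil_right]; simp
  termination_by i => min s1.length s2.length - i
  decreasing_by omega

theorem pvTake_mismatch (s1 s2 : List Char) :
    s1.take (pvMismatch s1 s2 (min s1.length s2.length) 0) = pvCpfx s1 s2 := by
  rw [pvMismatch_eq s1 s2 0]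
  simp only [List.drop_zero, Nat.zero_add]
  exact (List.prefix_iff_eq_take.mp (pvCpfx_prefix s1 s2)).symm

-- B's post-processing of a prefix, as a function of the char list
def pvEmit (p : List Char) : List Char :=
  (((p.splitOn '/').dropLast).map (fun w => w ++ ['_'])).flatten

theorem pvEmit_no_slash {w : List Char} (hw : '/' ∉ w) : pvEmit w = [] := by
  unfold pvEmit
  rw [List.splitOn, List.splitOnP_eq_single _ _ (by intro x hx; simp; rintro rfl; exact hw hx)]
  simp

theorem pvEmit_slash {w : List Char} (hw : '/' ∉ w) (r : List Char) :
    pvEmit (w ++ '/' :: r) = w ++ '_' :: pvEmit r := by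
  unfold pvEmit
  rw [List.splitOn, List.splitOnP_first _ _ (by intro x hx; simp; rintro rfl; exact hw hx) _ (by simp)]
  obtain ⟨y, ys, hys⟩ := List.exists_cons_of_ne_nil (List.splitOnP_ne_nil (· == '/') r)
  rw [List.splitOn, hys]
  simp

-- the loop of A equals `name ++ emit (word ++ common prefix)` whenever word has no '/'
theorem pvLoopA_eq : ∀ (l1 l2 : List Char) (name word : String), '/' ∉ word.toList →
    pvLoopA (l1.zip l2) name word = name ++ String.ofList (pvEmit (word.toList ++ pvCpfx l1 l2)) := by
  intro l1
  induction l1 with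
  | nil =>
    intro l2 name word hw
    simp [pvLoopA, pvCpfx, pvEmit_no_slash hw]
  | cons a as ih =>
    intro l2 name word hw
    cases l2 with
    | nil =>
      rw [pvCpfx_nil_right]
      simp [pvLoopA, pvEmit_no_slash hw]
    | cons b bs =>
      by_cases hab : a = b
      · subst hab
        by_cases hsl : a = '/'
        · subst hsl
          rw [List.zip_cons_cons, pvLoopA]
          rw [if_neg (by simp), if_pos rfl, ih bs _ "" (by simp)]
          rw [show pvCpfx ('/' :: as) ('/' :: bs) = '/' :: pvCpfx as bs from by simp [pvCpfx]]
          rw [pvEmit_slash hw]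
          apply String.ext
          simp
        · rw [List.zip_cons_cons, pvLoopA]
          rw [if_neg (by simp), if_neg hsl, ih bs _ (word ++ a.toString)
            (by simp [Char.toString]; exact ⟨hw, fun h => hsl h.symm⟩)]
          rw [show pvCpfx (a :: as) (a :: bs) = a :: pvCpfx as bs from by simp [pvCpfx]]
          apply String.ext
          simp [Char.toString]
      · rw [List.zip_cons_cons, pvLoopA, if_pos (by simpa using hab)]
        simp [pvCpfx, hab, pvEmit_no_slash hw]

-- ===== VERDICT (by name: the statement is the Claim_ definition above) =====
theorem find_dataset_name_spec : Claim_equal_find_dataset_name := by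
  intro str1 str2 _
  unfold Spec_find_dataset_name find_dataset_name find_dataset_name_alt
  dsimp only
  rw [pvLoopA_eq _ _ "" "" (by simp), pvTake_mismatch]
  apply String.ext
  simp [pvEmit]
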